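-- pv_equiv track=rewrite | github.com/dansok/poker | hand.py | check_highest_card
-- ===== SOURCE A (Python) =====
-- def check_highest_card(rank_count):
--     result = 10_000_000_000
--     multiplier = 1
--     for i in range(len(rank_count)):
--         count = rank_count[i]
--         if count > 0:
--             for _ in range(count):
--                 result += i * multiplier
--                 multiplier *= 100
--     return result
-- ===== SOURCE B (Python) =====
-- def check_highest_card(rank_count):
--     result = 10_000_000_000
--     multiplier = 1
--     for i, count in enumerate(rank_count):
--         if count > 0:
--             result += i * multiplier * (100**count - 1) // 99
--             multiplier *= 100**count
--     return result
-- ===== Notes on version B (the rewrite author's own statement) =====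
-- stated objective: simpler
-- what changed: The inner per-card accumulation loop is replaced by the geometric-series closed form: each rank contributes i*multiplier*(100**count-1)//99 in one arithmetic step and multiplier jumps by 100**count.
import Mathlib
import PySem

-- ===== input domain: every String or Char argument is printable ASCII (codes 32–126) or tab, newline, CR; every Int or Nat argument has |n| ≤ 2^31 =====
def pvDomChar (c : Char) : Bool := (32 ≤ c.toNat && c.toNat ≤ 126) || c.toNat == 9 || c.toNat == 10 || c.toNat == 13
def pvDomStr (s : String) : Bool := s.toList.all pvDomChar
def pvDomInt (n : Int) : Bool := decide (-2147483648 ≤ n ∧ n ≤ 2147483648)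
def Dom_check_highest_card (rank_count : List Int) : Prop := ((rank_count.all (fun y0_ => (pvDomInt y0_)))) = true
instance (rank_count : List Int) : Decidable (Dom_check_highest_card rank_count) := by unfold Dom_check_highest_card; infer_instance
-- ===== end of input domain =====

-- B replaces A's inner per-card accumulation loop by the geometric-series closed form
-- i*multiplier*(100**count - 1)//99 (objective: simpler).

-- ===== PORT A =====
-- inner loop 'for _ in range(count): result += i * multiplier; multiplier *= 100'
-- (count > 0, so range(count) runs count.toNat times)
def pvInnerA (i : Int) : Nat → Int × Int → Int × Int
  | 0, s => s
  | n + 1, (r, m) => pvInnerA i n (r + i * m, m * 100)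

def check_highest_card (rank_count : List Int) : Int :=
  -- 'count = rank_count[i]': i drawn from range(len(rank_count)) is always in range
  let s := (PySem.List.pyRange 0 (PySem.List.len rank_count) 1).foldl
    (fun (s : Int × Int) (i : Int) =>
      let count := PySem.List.pyGetD rank_count i 0
      if count > 0 then pvInnerA i count.toNat s else s)
    (10000000000, 1)
  s.1

-- ===== PORT B =====
def check_highest_card_alt (rank_count : List Int) : Int :=
  let s := (PySem.List.enumerate rank_count).foldl
    (fun (s : Int × Int) (p : Int × Int) =>
      if p.2 > 0 then
        (s.1 + PySem.Int.floordiv (p.1 * s.2 * (100 ^ p.2.toNat - 1)) 99,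
         s.2 * 100 ^ p.2.toNat)
      else s)
    (10000000000, 1)
  s.1

-- ===== PRECONDITION & SPEC =====
def Spec_check_highest_card (rank_count : List Int) (out : Int) : Prop := out = check_highest_card_alt rank_count
instance (rank_count : List Int) (out : Int) : Decidable (Spec_check_highest_card rank_count out) := by unfold Spec_check_highest_card; infer_instance

-- ===== CLAIM (what is proved, stated in full; the proofs are below) =====
def Claim_equal_check_highest_card : Prop := ∀ (rank_count : List Int), Dom_check_highest_card rank_count → Spec_check_highest_card rank_count (check_highest_card rank_count)

-- ===== LEMMAS AND PROOFS =====

-- geometric sum 1 + 100 + … + 100^(n-1), built front-to-back the way pvInnerA consumes it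
def pvGeo : Nat → Int
  | 0 => 0
  | n + 1 => 1 + 100 * pvGeo n

theorem pvGeo_99 (n : Nat) : 99 * pvGeo n = 100 ^ n - 1 := by
  induction n with
  | zero => simp [pvGeo]
  | succ n ih => simp only [pvGeo, pow_succ]; linarith

theorem pvInnerA_eq (i : Int) (n : Nat) (r m : Int) :
    pvInnerA i n (r, m) = (r + i * m * pvGeo n, m * 100 ^ n) := by
  induction n generalizing r m with
  | zero => simp [pvInnerA, pvGeo]
  | succ n ih => simp only [pvInnerA, ih, pvGeo, pow_succ, Prod.mk.injEq]; constructor <;> ring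

theorem pvFloordiv_geo (i m : Int) (n : Nat) :
    PySem.Int.floordiv (i * m * (100 ^ n - 1)) 99 = i * m * pvGeo n := by
  rw [PySem.Int.floordiv_eq_ediv_of_pos (by norm_num), ← pvGeo_99]
  rw [show i * m * (99 * pvGeo n) = 99 * (i * m * pvGeo n) by ring]
  exact Int.mul_ediv_cancel_left _ (by norm_num)

theorem check_highest_card_eq_alt (rank_count : List Int) :
    check_highest_card rank_count = check_highest_card_alt rank_count := by
  unfold check_highest_card check_highest_card_alt
  rw [PySem.List.enumerate_eq_map_pyRange (d := 0), List.foldl_map]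
  refine congrArg Prod.fst ?_
  congr 1
  funext s i
  rcases s with ⟨r, m⟩
  by_cases h : PySem.List.pyGetD rank_count i 0 > 0
  · simp only [h, if_pos, pvInnerA_eq, pvFloordiv_geo]
  · simp only [h, if_false]

-- ===== VERDICT (by name: the statement is the Claim_ definition above) =====
theorem check_highest_card_spec : Claim_equal_check_highest_card := by
  intro rank_count _
  exact check_highest_card_eq_alt rank_count
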